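-- pv_equiv track=rewrite | github.com/nishio/atcoder | tokiomarine2020/c.py | solve
-- ===== SOURCE A (Python) =====
-- def solve(N, K, AS):
--     for _i in range(K):
--         d = [0] * (N + 1)
--         for i in range(N):
--             x = AS[i]
--             d[max(i - x, 0)] += 1
--             d[min(i + x + 1, N)] -= 1
--         cur = 0
--         ret = [0] * N
--         for i in range(N):
--             cur += d[i]
--             ret[i] = cur
--         AS = ret
--         if all(x == N for x in ret):
--             return ret
--
--     return ret
-- ===== SOURCE B (Python) =====
-- def solve(N, K, AS):
--     for _ in range(K):
--         ret = [sum(1 for j in range(N) if j - AS[j] <= i <= j + AS[j])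
--                for i in range(N)]
--         if min(ret, default=N) == N:
--             return ret
--         AS = ret
--     return ret
-- ===== Notes on version B (the rewrite author's own statement) =====
-- stated objective: alternative
-- what changed: Each round now computes ret[i] directly as the count of lamps j whose interval j-AS[j] <= i <= j+AS[j] covers i (with a min-based saturation test), instead of building a +1/-1 difference array and prefix-summing it; Pre_ excludes K < 1 and lists shorter than N (A raises NameError/IndexError there) and lists with a negative value among the first N, where A's negative-index wraparound into the difference array yields accidental values (or raises, possibly only in a later round, which cannot be separated in closed form).
-- outside the precondition, e.g. on solve(2, 1, [-1, 0]): A returns [-1, 1], B returns [0, 1]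
import Mathlib
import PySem

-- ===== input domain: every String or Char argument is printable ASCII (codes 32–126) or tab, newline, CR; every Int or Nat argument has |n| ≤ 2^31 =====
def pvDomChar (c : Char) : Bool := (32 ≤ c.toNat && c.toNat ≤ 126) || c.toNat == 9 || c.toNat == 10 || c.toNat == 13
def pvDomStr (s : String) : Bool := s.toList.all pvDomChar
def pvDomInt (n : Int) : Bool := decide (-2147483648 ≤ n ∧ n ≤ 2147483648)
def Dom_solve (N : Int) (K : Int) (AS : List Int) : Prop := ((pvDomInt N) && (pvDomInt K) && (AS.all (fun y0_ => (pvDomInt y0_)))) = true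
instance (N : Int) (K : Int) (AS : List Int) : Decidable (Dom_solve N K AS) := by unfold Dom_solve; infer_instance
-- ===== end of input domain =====

-- B replaces A's per-round difference-array + prefix-sum sweep by a direct per-position
-- count of covering lamps (alternative decomposition, not faster).

-- ===== PORT A =====
-- d[idx] += v  (Python index semantics: negative wraps; out of range would raise, excluded by Pre_)
def pvBumpA (d : List Int) (idx v : Int) : List Int :=
  PySem.List.pySetD d idx (PySem.List.pyGetD d idx 0 + v)

-- one iteration of A's outer loop body (the imos round)
def pvRoundA (N : Int) (AS : List Int) : List Int :=
  let d := (PySem.List.pyRange 0 N 1).foldl (fun d i =>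
      let x := PySem.List.pyGetD AS i 0
      let d := pvBumpA d (max (i - x) 0) 1
      pvBumpA d (min (i + x + 1) N) (-1)) (List.replicate (N + 1).toNat 0)
  ((PySem.List.pyRange 0 N 1).foldl (fun (st : Int × List Int) i =>
      let cur := st.1 + PySem.List.pyGetD d i 0
      (cur, PySem.List.pySetD st.2 i cur)) ((0 : Int), List.replicate N.toNat 0)).2

def pvLoopA (N : Int) (AS ret : List Int) : Nat → List Int
  | 0 => ret
  | Nat.succ k =>
    let r := pvRoundA N AS
    if r.all (fun x => x == N) then r else pvLoopA N r r k

def solve (N : Int) (K : Int) (AS : List Int) : List Int :=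
  pvLoopA N AS [] K.toNat

-- ===== PORT B =====
-- one round of B: ret[i] = number of lamps j with j - AS[j] <= i <= j + AS[j]
def pvRoundB (N : Int) (AS : List Int) : List Int :=
  (PySem.List.pyRange 0 N 1).map (fun i =>
    (PySem.List.pyRange 0 N 1).foldl (fun acc j =>
      let x := PySem.List.pyGetD AS j 0
      if j - x ≤ i ∧ i ≤ j + x then acc + 1 else acc) (0 : Int))

def pvLoopB (N : Int) (AS ret : List Int) : Nat → List Int
  | 0 => ret
  | Nat.succ k =>
    let r := pvRoundB N AS
    if (PySem.List.min? r id).getD N == N then r else pvLoopB N r r k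

def solve_alt (N : Int) (K : Int) (AS : List Int) : List Int :=
  pvLoopB N AS [] K.toNat

-- ===== PRECONDITION & SPEC =====
-- Pre_ excludes: K < 1 (A raises NameError), lists shorter than N (IndexError), and lists
-- with a negative value among the first N, where A's negative-index wraparound into the
-- difference array yields accidental values (or raises, possibly only in a later round,
-- which cannot be separated from the returning cases in closed form).
def Pre_solve (N : Int) (K : Int) (AS : List Int) : Prop :=
  1 ≤ K ∧ N ≤ (AS.length : Int) ∧ ∀ x ∈ AS.take N.toNat, 0 ≤ x
instance (N : Int) (K : Int) (AS : List Int) : Decidable (Pre_solve N K AS) := by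
  unfold Pre_solve; infer_instance

def pvWitness_solve : Int × Int × List Int := (3, 2, [0, 1, 0])

def Spec_solve (N : Int) (K : Int) (AS : List Int) (out : List Int) : Prop := out = solve_alt N K AS
instance (N : Int) (K : Int) (AS : List Int) (out : List Int) : Decidable (Spec_solve N K AS out) := by unfold Spec_solve; infer_instance

-- ===== CLAIM (what is proved, stated in full; the proofs are below) =====
def Claim_equal_solve : Prop := ∀ (N : Int) (K : Int) (AS : List Int), Dom_solve N K AS → Pre_solve N K AS → Spec_solve N K AS (solve N K AS)

-- ===== LEMMAS AND PROOFS =====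

-- an AS acceptable for a round
def pvGood (N : Int) (AS : List Int) : Prop :=
  N ≤ (AS.length : Int) ∧ ∀ x ∈ AS.take N.toNat, 0 ≤ x

-- a counting fold is the sum of 0/1 indicators
theorem pvFoldCount {α : Type} (P : α → Prop) [DecidablePred P] :
    ∀ (l : List α) (acc : Int),
      l.foldl (fun a j => if P j then a + 1 else a) acc
        = acc + (l.map (fun j => if P j then (1 : Int) else 0)).sum := by
  intro l
  induction l with
  | nil => intro acc; simp
  | cons h t ih =>
    intro acc
    simp only [List.foldl_cons, List.map_cons, List.sum_cons, ih]
    split <;> ring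

theorem pvRoundB_entry (N : Int) (AS : List Int) (e : Int)
    (he : e ∈ pvRoundB N AS) :
    0 ≤ e ∧ e ≤ ((PySem.List.pyRange 0 N 1).length : Int) := by
  unfold pvRoundB at he
  obtain ⟨i, _, rfl⟩ := List.mem_map.mp he
  rw [pvFoldCount (fun j => j - PySem.List.pyGetD AS j 0 ≤ i ∧ i ≤ j + PySem.List.pyGetD AS j 0)]
  constructor
  · have h0 : (0:Int) ≤ ((PySem.List.pyRange 0 N 1).map
        (fun j => if j - PySem.List.pyGetD AS j 0 ≤ i ∧ i ≤ j + PySem.List.pyGetD AS j 0 then (1:Int) else 0)).sum := by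
      apply List.sum_nonneg
      intro x hx
      obtain ⟨j, _, rfl⟩ := List.mem_map.mp hx
      split <;> norm_num
    omega
  · have h1 : ((PySem.List.pyRange 0 N 1).map
        (fun j => if j - PySem.List.pyGetD AS j 0 ≤ i ∧ i ≤ j + PySem.List.pyGetD AS j 0 then (1:Int) else 0)).sum
        ≤ ((PySem.List.pyRange 0 N 1).map
        (fun j => if j - PySem.List.pyGetD AS j 0 ≤ i ∧ i ≤ j + PySem.List.pyGetD AS j 0 then (1:Int) else 0)).length • (1:Int) := by
      apply List.sum_le_card_nsmul
      intro x hx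
      obtain ⟨j, _, rfl⟩ := List.mem_map.mp hx
      split <;> norm_num
    simp only [List.length_map, nsmul_eq_mul, mul_one] at h1
    omega

-- prefix sum of d up to and including index i
def pvPS (d : List Int) (i : Nat) : Int :=
  ((List.range (i + 1)).map (fun t => d.getD t 0)).sum

-- one lamp's pair of difference-array bumps, in clean Nat-indexed form
def pvStep (N : Int) (AS : List Int) (d : List Int) (j : Nat) : List Int :=
  pvBumpA (pvBumpA d (max ((j : Int) - AS.getD j 0) 0) 1)
    (min ((j : Int) + AS.getD j 0 + 1) N) (-1)

theorem pvSumIte (g : Nat → Int) (v : Int) (m : Nat) : ∀ n : Nat,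
    ((List.range n).map (fun t => g t + if t = m then v else 0)).sum
      = ((List.range n).map g).sum + (if m < n then v else 0) := by
  intro n
  induction n with
  | zero => simp
  | succ n ih =>
    rw [List.range_succ, List.map_append, List.sum_append, List.map_append, List.sum_append, ih]
    simp only [List.map_cons, List.map_nil, List.sum_cons, List.sum_nil]
    by_cases h : n = m
    · subst h; simp; ring
    · have h1 : (m < n + 1) ↔ (m < n) := by omega
      simp [h, h1]
      ring

theorem pvGetD_set (l : List Int) (k : Nat) (w : Int) (hk : k < l.length) (t : Nat) :
    (l.set k w).getD t 0 = if t = k then w else l.getD t 0 := by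
  simp only [List.getD_eq_getElem?_getD, List.getElem?_set]
  by_cases h : t = k
  · subst h; simp [hk]
  · simp [h, show ¬ k = t from fun hh => h hh.symm]

theorem pvBump_len (d : List Int) (idx v : Int) : (pvBumpA d idx v).length = d.length := by
  unfold pvBumpA
  exact PySem.List.length_pySetD d idx _

theorem pvBump_PS (d : List Int) (idx v : Int) (i : Nat)
    (h0 : 0 ≤ idx) (hlt : idx < (d.length : Int)) :
    pvPS (pvBumpA d idx v) i = pvPS d i + (if idx ≤ (i : Int) then v else 0) := by
  have hk : idx.toNat < d.length := by omega
  have hgd : PySem.List.pyGetD d idx 0 = d.getD idx.toNat 0 := by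
    rw [PySem.List.pyGetD_eq_getElem d 0 h0 hlt]
    simp [List.getD_eq_getElem?_getD, List.getElem?_eq_getElem hk]
  unfold pvBumpA pvPS
  rw [PySem.List.pySetD_of_nonneg d _ h0, hgd]
  have hmap : ∀ t : Nat, (d.set idx.toNat (d.getD idx.toNat 0 + v)).getD t 0
      = d.getD t 0 + (if t = idx.toNat then v else 0) := by
    intro t
    rw [pvGetD_set d idx.toNat _ hk t]
    by_cases h : t = idx.toNat
    · subst h; simp
    · simp [h]
  calc ((List.range (i + 1)).map (fun t => (d.set idx.toNat (d.getD idx.toNat 0 + v)).getD t 0)).sum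
      = ((List.range (i + 1)).map (fun t => d.getD t 0 + (if t = idx.toNat then v else 0))).sum := by
        apply congrArg
        exact List.map_congr_left (fun t _ => hmap t)
    _ = ((List.range (i + 1)).map (fun t => d.getD t 0)).sum + (if idx.toNat < i + 1 then v else 0) :=
        pvSumIte _ v idx.toNat (i + 1)
    _ = ((List.range (i + 1)).map (fun t => d.getD t 0)).sum + (if idx ≤ (i : Int) then v else 0) := by
        congr 1
        have : (idx.toNat < i + 1) ↔ (idx ≤ (i : Int)) := by omega
        simp [this]

theorem pvDfold (N : Int) (AS : List Int) (hlen : N ≤ (AS.length : Int))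
    (hpos : ∀ x ∈ AS.take N.toNat, 0 ≤ x) :
    ∀ m : Nat, m ≤ N.toNat →
      ((List.range m).foldl (pvStep N AS) (List.replicate (N + 1).toNat 0)).length = (N + 1).toNat
      ∧ ∀ i : Nat,
        pvPS ((List.range m).foldl (pvStep N AS) (List.replicate (N + 1).toNat 0)) i
          = ((List.range m).map (fun (j : Nat) =>
              if max ((j : Int) - AS.getD j 0) 0 ≤ (i : Int) ∧ (i : Int) < min ((j : Int) + AS.getD j 0 + 1) N
              then (1 : Int) else 0)).sum := by
  intro m
  induction m with
  | zero =>
    intro _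
    constructor
    · simp
    · intro i
      unfold pvPS
      simp
  | succ m ih =>
    intro hm
    obtain ⟨ihl, ihs⟩ := ih (by omega)
    have hNpos : 0 < N.toNat := by omega
    have hN0 : 0 ≤ N := by omega
    have hmN : (m : Int) < N := by omega
    -- the lamp value is nonnegative
    have hx : 0 ≤ AS.getD m 0 := by
      have hmlen : m < AS.length := by omega
      have htake : (AS.take N.toNat).length = N.toNat := by
        rw [List.length_take]; omega
      have hmem : AS[m] ∈ AS.take N.toNat := by
        have : (AS.take N.toNat)[m]'(by omega) = AS[m] := List.getElem_take
        rw [← this]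
        exact List.getElem_mem _
      have := hpos _ hmem
      rwa [List.getD_eq_getElem AS 0 hmlen]
    set x := AS.getD m 0 with hxdef
    set a := max ((m : Int) - x) 0 with hadef
    set b := min ((m : Int) + x + 1) N with hbdef
    have ha : 0 ≤ a ∧ a < N + 1 := by constructor <;> omega
    have hb : 0 ≤ b ∧ b < N + 1 := by constructor <;> omega
    have hab : a < b := by omega
    rw [List.range_succ, List.foldl_append, List.foldl_cons, List.foldl_nil]
    have hlen1 : (((List.range m).foldl (pvStep N AS) (List.replicate (N + 1).toNat 0)).length : Int) = N + 1 := by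
      rw [ihl]; omega
    set dm := (List.range m).foldl (pvStep N AS) (List.replicate (N + 1).toNat 0) with hdm
    constructor
    · unfold pvStep
      rw [pvBump_len, pvBump_len, ihl]
    · intro i
      unfold pvStep
      rw [pvBump_PS _ b (-1) i hb.1 (by rw [pvBump_len]; omega),
          pvBump_PS _ a 1 i ha.1 (by omega), ihs i]
      rw [List.map_append, List.sum_append]
      simp only [List.map_cons, List.map_nil, List.sum_cons, List.sum_nil]
      have : (if a ≤ (i : Int) then (1 : Int) else 0) + (if b ≤ (i : Int) then (-1 : Int) else 0)
          = if a ≤ (i : Int) ∧ (i : Int) < b then (1 : Int) else 0 := by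
        split_ifs <;> omega
      linarith [this]

theorem pvSet_map_range (n m : Nat) (f : Nat → Int) (v : Int) (_hm : m < n) :
    ((List.range n).map f).set m v = (List.range n).map (fun i => if i = m then v else f i) := by
  apply List.ext_getElem
  · simp
  · intro k h1 h2
    simp only [List.length_set, List.length_map, List.length_range] at h1
    rw [List.getElem_set, List.getElem_map, List.getElem_range]
    by_cases h : m = k
    · subst h; simp
    · simp [h, show ¬ k = m from fun hh => h hh.symm]

theorem pvRetFold (N : Int) (d : List Int) (_hN : 0 ≤ N) :
    ∀ m : Nat, m ≤ N.toNat →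
      ((List.range m).foldl (fun (st : Int × List Int) (j : Nat) =>
          (st.1 + d.getD j 0, st.2.set j (st.1 + d.getD j 0)))
        ((0 : Int), List.replicate N.toNat 0))
      = (((List.range m).map (fun t => d.getD t 0)).sum,
         (List.range N.toNat).map (fun i => if i < m then pvPS d i else 0)) := by
  intro m
  induction m with
  | zero =>
    intro _
    simp only [List.range_zero, List.foldl_nil, List.map_nil, List.sum_nil, Prod.mk.injEq,
      true_and]
    apply List.ext_getElem
    · simp
    · intro k h1 h2
      simp
  | succ m ih =>
    intro _
    rw [List.range_succ, List.foldl_append, List.foldl_cons, List.foldl_nil, ih (by omega)]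
    have hPSm : ((List.range m).map (fun t => d.getD t 0)).sum + d.getD m 0 = pvPS d m := by
      unfold pvPS
      rw [List.range_succ, List.map_append, List.sum_append]
      simp
    simp only [Prod.mk.injEq]
    refine ⟨?_, ?_⟩
    · simp
    · rw [pvSet_map_range _ m _ _ (by omega)]
      apply List.map_congr_left
      intro k hk
      by_cases h1 : k = m
      · subst h1
        rw [if_pos rfl, if_pos (by omega)]
        exact hPSm
      · rw [if_neg h1]
        by_cases h2 : k < m
        · rw [if_pos h2, if_pos (by omega)]
        · rw [if_neg h2, if_neg (by omega)]

theorem pvRound_eq (N : Int) (AS : List Int) (h : pvGood N AS) :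
    pvRoundA N AS = pvRoundB N AS := by
  obtain ⟨hlen, hpos⟩ := h
  by_cases hN : N ≤ 0
  · have hnil : PySem.List.pyRange 0 N 1 = [] := PySem.List.pyRange_one_eq_nil hN
    have h0 : N.toNat = 0 := by omega
    unfold pvRoundA pvRoundB
    simp [hnil, h0]
  · push Not at hN
    have hN0 : 0 ≤ N := le_of_lt hN
    have hrange : PySem.List.pyRange 0 N 1 = (List.range N.toNat).map (fun (k : Nat) => (k : Int)) := by
      rw [PySem.List.pyRange_one]
      have h1 : (N - 0).toNat = N.toNat := by omega
      rw [h1]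
      exact List.map_congr_left (fun k _ => by omega)
    unfold pvRoundA pvRoundB
    rw [hrange]
    simp only [List.foldl_map, List.map_map]
    have hdfold : (List.range N.toNat).foldl (fun d (k : Nat) =>
          pvBumpA (pvBumpA d (max ((k : Int) - PySem.List.pyGetD AS (k : Int) 0) 0) 1)
            (min ((k : Int) + PySem.List.pyGetD AS (k : Int) 0 + 1) N) (-1))
          (List.replicate (N + 1).toNat 0)
        = (List.range N.toNat).foldl (pvStep N AS) (List.replicate (N + 1).toNat 0) := by
      apply List.foldl_ext
      intro d k _
      simp [pvStep]
    rw [hdfold]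
    obtain ⟨hdlen, hdPS⟩ := pvDfold N AS hlen hpos N.toNat (le_refl _)
    set dA := (List.range N.toNat).foldl (pvStep N AS) (List.replicate (N + 1).toNat 0) with hdA
    simp only [PySem.List.pyGetD_natCast, PySem.List.pySetD_natCast]
    rw [pvRetFold N dA hN0 N.toNat (le_refl _)]
    apply List.ext_getElem
    · simp
    · intro k h1 h2
      simp only [List.length_map, List.length_range] at h1
      rw [List.getElem_map, List.getElem_map, List.getElem_range]
      simp only [Function.comp_apply]
      rw [if_pos h1]
      rw [pvFoldCount (fun (j : Nat) => (j : Int) - AS.getD j 0 ≤ (k : Int) ∧ (k : Int) ≤ (j : Int) + AS.getD j 0)]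
      rw [hdPS k, zero_add]
      apply congrArg
      apply List.map_congr_left
      intro j hj
      have hkN : (k : Int) < N := by omega
      have heq : (max ((j : Int) - AS.getD j 0) 0 ≤ (k : Int) ∧ (k : Int) < min ((j : Int) + AS.getD j 0 + 1) N)
          ↔ ((j : Int) - AS.getD j 0 ≤ (k : Int) ∧ (k : Int) ≤ (j : Int) + AS.getD j 0) := by
        omega
      simp only [heq]

theorem pvRoundB_good (N : Int) (AS : List Int) : pvGood N (pvRoundB N AS) := by
  constructor
  · have : (pvRoundB N AS).length = (N - 0).toNat := by
      unfold pvRoundB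
      rw [List.length_map, PySem.List.length_pyRange_one]
    rw [this]
    omega
  · intro x hx
    exact (pvRoundB_entry N AS x (List.take_subset _ _ hx)).1

theorem pvExit_eq (N : Int) (AS : List Int) :
    ((pvRoundB N AS).all (fun x => x == N)) =
      ((PySem.List.min? (pvRoundB N AS) id).getD N == N) := by
  rcases hm : PySem.List.min? (pvRoundB N AS) id with _ | m
  · -- empty list: both sides true
    have hnil : pvRoundB N AS = [] := (PySem.List.min?_eq_none_iff _ _).mp hm
    simp [hnil]
  · have hmem := PySem.List.min?_mem hm
    have hle := PySem.List.min?_isMin hm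
    -- elements are at most the number of lamps, which bounds them by N when nonempty
    have hlen : 0 < ((PySem.List.pyRange 0 N 1).length : Int) := by
      have := pvRoundB_entry N AS m hmem
      unfold pvRoundB at hmem
      rcases List.mem_map.mp hmem with ⟨i, hi, _⟩
      have : (PySem.List.pyRange 0 N 1) ≠ [] := by
        intro h; rw [h] at hi; exact absurd hi (List.not_mem_nil)
      have := List.length_pos_iff.mpr this
      omega
    have hNpos : ((PySem.List.pyRange 0 N 1).length : Int) = N := by
      rw [PySem.List.length_pyRange_one]
      have h0 : (0:Int) < N := by
        by_contra h
        rw [PySem.List.pyRange_one_eq_nil (by omega)] at hlen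
        simp at hlen
      omega
    simp only [Option.getD_some]
    by_cases hall : ∀ x ∈ pvRoundB N AS, x = N
    · have h1 : (pvRoundB N AS).all (fun x => x == N) = true := by
        rw [List.all_eq_true]; intro x hx; exact beq_iff_eq.mpr (hall x hx)
      have h2 : m = N := hall m hmem
      rw [h1, h2]
      simp
    · push Not at hall
      obtain ⟨y, hy, hyne⟩ := hall
      have hyle : y ≤ N := by
        have := (pvRoundB_entry N AS y hy).2; omega
      have h1 : (pvRoundB N AS).all (fun x => x == N) = false := by
        rw [List.all_eq_false]
        exact ⟨y, hy, by simpa using hyne⟩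
      have hmlt : m ≠ N := by
        intro h
        have := hle y hy
        simp only [id] at this
        omega
      rw [h1]
      have : (m == N) = false := beq_eq_false_iff_ne.mpr hmlt
      rw [this]

theorem loop_eq (N : Int) : ∀ (k : Nat) (AS ret : List Int), pvGood N AS →
    pvLoopA N AS ret k = pvLoopB N AS ret k := by
  intro k
  induction k with
  | zero => intro AS ret _; rfl
  | succ k ih =>
    intro AS ret hG
    simp only [pvLoopA, pvLoopB]
    rw [pvRound_eq N AS hG, pvExit_eq N AS]
    split
    · rfl
    · exact ih _ _ (pvRoundB_good N AS)

-- ===== VERDICT (by name: the statement is the Claim_ definition above) =====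
theorem solve_spec : Claim_equal_solve := by
  intro N K AS _ hPre
  unfold Spec_solve solve solve_alt
  exact loop_eq N K.toNat AS [] ⟨hPre.2.1, hPre.2.2⟩
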